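-- pv_equiv track=rewrite | github.com/thealexlittle/c124-chatbot | chatbot.py | echo_sentiments
-- ===== SOURCE A (Python) =====
-- def echo_sentiments(sentiments):
--     pos = [x for x in sentiments if x[1] > 0]
--     neg = [x for x in sentiments if x[1] < 0]
--
--     pos_str = 'You liked '
--     for i in range(len(pos)):
--         pos_str += ' ' + pos[i][0]
--         if i != len(pos) - 1:
--             pos_str += ','
--     pos_str += '.'
--
--     neg_str = 'You did not like '
--     for i in range(len(neg)):
--         neg_str += ' ' + neg[i][0]
--         if i != len(neg) - 1:
--             neg_str += ','
--     neg_str += '.'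
--
--     return 'Okay! ' + pos_str + ' ' + neg_str + ' Thank you!\n'
-- ===== SOURCE B (Python) =====
-- def echo_sentiments(sentiments):
--     pos, neg = [], []
--     for name, score in sentiments:
--         if score > 0:
--             pos.append(name)
--         elif score < 0:
--             neg.append(name)
--     pos_str = 'You liked ' + ','.join(' ' + n for n in pos) + '.'
--     neg_str = 'You did not like ' + ','.join(' ' + n for n in neg) + '.'
--     return 'Okay! ' + pos_str + ' ' + neg_str + ' Thank you!\n'
-- ===== Notes on version B (the rewrite author's own statement) =====
-- stated objective: simpler
-- what changed: Replaces A's two filter comprehensions plus two index-based comma loops (with a last-index test per iteration) by a single partition pass over sentiments and a ','.join of the collected names.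
import Mathlib
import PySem

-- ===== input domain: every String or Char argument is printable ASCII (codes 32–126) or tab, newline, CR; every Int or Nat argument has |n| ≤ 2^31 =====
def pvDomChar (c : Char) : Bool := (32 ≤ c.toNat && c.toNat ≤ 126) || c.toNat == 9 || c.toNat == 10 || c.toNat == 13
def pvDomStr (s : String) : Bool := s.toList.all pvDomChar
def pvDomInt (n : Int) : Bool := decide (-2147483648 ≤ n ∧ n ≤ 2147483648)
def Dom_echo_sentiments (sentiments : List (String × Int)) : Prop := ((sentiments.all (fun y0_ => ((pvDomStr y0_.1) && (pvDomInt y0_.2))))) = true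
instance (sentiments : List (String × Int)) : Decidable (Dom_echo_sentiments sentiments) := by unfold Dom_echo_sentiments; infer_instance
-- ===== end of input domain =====

-- B replaces A's two filter passes + two index-based comma loops by one partition pass and a join (objective: simpler).

-- ===== PORT A =====
def echo_sentiments (sentiments : List (String × Int)) : String :=
  let pos := sentiments.filter (fun x => x.2 > 0)
  let neg := sentiments.filter (fun x => x.2 < 0)
  let pos_str :=
    (PySem.List.pyRange 0 (pos.length : Int) 1).foldl
      (fun s i =>
        let s := s ++ " " ++ (PySem.List.pyGetD pos i ("", 0)).1
        if i ≠ (pos.length : Int) - 1 then s ++ "," else s)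
      "You liked "
  let pos_str := pos_str ++ "."
  let neg_str :=
    (PySem.List.pyRange 0 (neg.length : Int) 1).foldl
      (fun s i =>
        let s := s ++ " " ++ (PySem.List.pyGetD neg i ("", 0)).1
        if i ≠ (neg.length : Int) - 1 then s ++ "," else s)
      "You did not like "
  let neg_str := neg_str ++ "."
  "Okay! " ++ pos_str ++ " " ++ neg_str ++ " Thank you!\n"

-- ===== PORT B =====
-- hand port of ','.join(l): first element, then "sep ++ elem" for the rest (exact for any list)
def pyJoin (sep : String) (l : List String) : String :=
  match l with
  | [] => ""
  | a :: t => t.foldl (fun s y => s ++ sep ++ y) a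

def echo_sentiments_alt (sentiments : List (String × Int)) : String :=
  let pn := sentiments.foldl
    (fun (pn : List String × List String) x =>
      if x.2 > 0 then (pn.1 ++ [x.1], pn.2)
      else if x.2 < 0 then (pn.1, pn.2 ++ [x.1])
      else pn)
    ([], [])
  let pos_str := "You liked " ++ pyJoin "," (pn.1.map (fun n => " " ++ n)) ++ "."
  let neg_str := "You did not like " ++ pyJoin "," (pn.2.map (fun n => " " ++ n)) ++ "."
  "Okay! " ++ pos_str ++ " " ++ neg_str ++ " Thank you!\n"

-- ===== PRECONDITION & SPEC =====
def Spec_echo_sentiments (sentiments : List (String × Int)) (out : String) : Prop := out = echo_sentiments_alt sentiments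
instance (sentiments : List (String × Int)) (out : String) : Decidable (Spec_echo_sentiments sentiments out) := by unfold Spec_echo_sentiments; infer_instance

-- ===== CLAIM (what is proved, stated in full; the proofs are below) =====
def Claim_equal_echo_sentiments : Prop := ∀ (sentiments : List (String × Int)), Dom_echo_sentiments sentiments → Spec_echo_sentiments sentiments (echo_sentiments sentiments)

-- ===== LEMMAS AND PROOFS =====

-- "name," pieces of A's loop before the last element
def commaCat : List (String × Int) → String
  | [] => ""
  | p :: t => " " ++ p.1 ++ "," ++ commaCat t

-- ",name" pieces of B's join after the first element
def sufCat : List String → String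
  | [] => ""
  | y :: t => "," ++ y ++ sufCat t

theorem foldl_sufCat (xs : List String) (init : String) :
    xs.foldl (fun s y => s ++ "," ++ y) init = init ++ sufCat xs := by
  induction xs generalizing init with
  | nil => simp [sufCat]
  | cons y t ih =>
    rw [List.foldl_cons, ih]
    simp [sufCat, String.append_assoc]

theorem sufCat_append_singleton (ys : List String) (b : String) :
    sufCat (ys ++ [b]) = sufCat ys ++ ("," ++ b) := by
  induction ys with
  | nil => simp [sufCat]
  | cons y t ih => simp [sufCat, String.append_assoc, ih]

theorem pyJoin_cons (a : String) (t : List String) :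
    pyJoin "," (a :: t) = a ++ sufCat t := by
  simp [pyJoin, foldl_sufCat]

theorem foldl_commaCat (m : List (String × Int)) (init : String) :
    m.foldl (fun s p => s ++ " " ++ p.1 ++ ",") init = init ++ commaCat m := by
  induction m generalizing init with
  | nil => simp [commaCat]
  | cons p t ih =>
    rw [List.foldl_cons, ih]
    simp [commaCat, String.append_assoc]

theorem comma_suf (t : List (String × Int)) :
    "," ++ commaCat t = sufCat (t.map (fun x => " " ++ x.1)) ++ "," := by
  induction t with
  | nil => simp [commaCat, sufCat]
  | cons p t ih => simp [commaCat, sufCat, String.append_assoc, ← ih]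

theorem loop_eq (l : List (String × Int)) (init : String) :
    (PySem.List.pyRange 0 (l.length : Int) 1).foldl
      (fun s i =>
        let s := s ++ " " ++ (PySem.List.pyGetD l i ("", 0)).1
        if i ≠ (l.length : Int) - 1 then s ++ "," else s) init
  = init ++ pyJoin "," (l.map (fun x => " " ++ x.1)) := by
  rcases List.eq_nil_or_concat l with rfl | ⟨m, x, rfl⟩
  · simp [PySem.List.pyRange_one_eq_nil, pyJoin]
  · simp only [List.concat_eq_append]
    have hlen : ((m ++ [x]).length : Int) = (m.length : Int) + 1 := by
      simp
    rw [hlen, PySem.List.pyRange_one_succ_right (by positivity)]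
    rw [List.foldl_append]
    have hcongr :
        (PySem.List.pyRange 0 (m.length : Int) 1).foldl
          (fun s i =>
            let s := s ++ " " ++ (PySem.List.pyGetD (m ++ [x]) i ("", 0)).1
            if i ≠ (m.length : Int) + 1 - 1 then s ++ "," else s) init
        = (PySem.List.pyRange 0 ((m.length : Int)) 1).foldl
          (fun s i => s ++ " " ++ (PySem.List.pyGetD m i ("", 0)).1 ++ ",") init := by
      apply PySem.List.foldl_congr_mem
      intro acc i hi
      rcases (PySem.List.mem_pyRange_one).1 hi with ⟨h0, h1⟩
      obtain ⟨k, rfl⟩ : ∃ k : Nat, i = (k : Int) := ⟨i.toNat, by omega⟩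
      have hk : k < m.length := by exact_mod_cast h1
      have hne : (k : Int) ≠ (m.length : Int) + 1 - 1 := by omega
      have hkne : k ≠ m.length := by omega
      simp [PySem.List.pyGetD_natCast, List.getD_eq_getElem?_getD,
        List.getElem?_append_left hk, hkne]
    rw [hcongr, PySem.List.foldl_pyRange_zero_pyGetD' m ("", 0)
          (fun s p => s ++ " " ++ p.1 ++ ",") init, foldl_commaCat]
    have hx : PySem.List.pyGetD (m ++ [x]) (m.length : Int) ("", 0) = x := by
      simp [PySem.List.pyGetD_natCast, List.getD_eq_getElem?_getD]
    simp only [List.foldl_cons, List.foldl_nil, hx]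
    have hne : ¬ ((m.length : Int) ≠ (m.length : Int) + 1 - 1) := by omega
    simp only [hne, ite_false]
    rcases m with _ | ⟨p, t⟩
    · simp [commaCat, pyJoin, String.append_assoc]
    · simp only [commaCat, List.map_append, List.map_cons, List.map_nil,
        List.cons_append, pyJoin_cons]
      rw [sufCat_append_singleton]
      have := comma_suf t
      -- init ++ (" " ++ p.1 ++ "," ++ commaCat t) ++ " " ++ x.1
      --   = init ++ (" " ++ p.1 ++ (sufCat … ++ ("," ++ (" " ++ x.1))))
      calc init ++ (" " ++ p.1 ++ "," ++ commaCat t) ++ " " ++ x.1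
          = init ++ " " ++ p.1 ++ (("," ++ commaCat t) ++ (" " ++ x.1)) := by
            simp [String.append_assoc]
        _ = init ++ " " ++ p.1 ++ ((sufCat (t.map (fun x => " " ++ x.1)) ++ ",") ++ (" " ++ x.1)) := by
            rw [this]
        _ = init ++ (" " ++ p.1 ++ (sufCat (t.map (fun x => " " ++ x.1)) ++ ("," ++ (" " ++ x.1)))) := by
            simp [String.append_assoc]

theorem partition_eq (l : List (String × Int)) (a b : List String) :
    l.foldl
      (fun (pn : List String × List String) x =>
        if x.2 > 0 then (pn.1 ++ [x.1], pn.2)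
        else if x.2 < 0 then (pn.1, pn.2 ++ [x.1])
        else pn) (a, b)
    = (a ++ (l.filter (fun x => x.2 > 0)).map (·.1),
       b ++ (l.filter (fun x => x.2 < 0)).map (·.1)) := by
  induction l generalizing a b with
  | nil => simp
  | cons x t ih =>
    by_cases h1 : x.2 > 0
    · have h2 : ¬ x.2 < 0 := by omega
      simp [List.foldl, h1, h2, ih]
    · by_cases h2 : x.2 < 0
      · simp [List.foldl, h1, h2, ih]
      · simp [List.foldl, h1, h2, ih]

-- ===== VERDICT (by name: the statement is the Claim_ definition above) =====
theorem echo_sentiments_spec : Claim_equal_echo_sentiments := by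
  intro sentiments _
  unfold Spec_echo_sentiments echo_sentiments echo_sentiments_alt
  rw [partition_eq]
  simp only [List.nil_append, loop_eq, List.map_map]
  rfl
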